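-- pv_equiv track=rewrite | github.com/samarium-lang/Samarium | src/parser.py | groupnames
-- ===== SOURCE A (Python) =====
-- def groupnames(array: list[str]) -> list[str]:
--     def find_2nd(array: list[str]) -> int:
--         x = 0
--         for i, c in enumerate(array):
--             x += c == "="
--             if x == 2:
--                 return i
--         return 0
--     try:
--         ind = array.index("=") - 1
--         out = array[:ind]
--         array = array[ind:]
--     except ValueError:
--         return array
--     while x := find_2nd(array):
--         out += ["".join(array[:x - 1])]
--         array = array[x - 1:]
--     return out + ["".join(array)]
-- ===== SOURCE B (Python) =====
-- def groupnames(array: list[str]) -> list[str]: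
--     eqs = [i for i, c in enumerate(array) if c == "="]
--     if not eqs:
--         return array
--     b = max(eqs[0] - 1, 0)
--     out = array[:b]
--     for e in eqs[1:]:
--         out.append("".join(array[b:e - 1]))
--         b = e - 1
--     out.append("".join(array[b:]))
--     return out
-- ===== Notes on version B (the rewrite author's own statement) =====
-- stated objective: alternative
-- what changed: B records all '=' positions in one enumerate pass and emits each name segment directly from consecutive positions, instead of A's while-loop that repeatedly rescans the remaining list with find_2nd and re-slices it.
-- intended difference: On lists whose first element is '=' (other than ['=']), A's ind = index('=')-1 = -1 wraps around so A returns the input unchanged; B starts the first segment at index 0 and groups the tokens as intended. — e.g. on groupnames(["=", "a"]): A returns ["=", "a"], B returns ["=a"]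
-- outside the precondition, e.g. on groupnames(['a', '=', '=']): A does not finish within the time limit, B returns ['a', '==']
import Mathlib
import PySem

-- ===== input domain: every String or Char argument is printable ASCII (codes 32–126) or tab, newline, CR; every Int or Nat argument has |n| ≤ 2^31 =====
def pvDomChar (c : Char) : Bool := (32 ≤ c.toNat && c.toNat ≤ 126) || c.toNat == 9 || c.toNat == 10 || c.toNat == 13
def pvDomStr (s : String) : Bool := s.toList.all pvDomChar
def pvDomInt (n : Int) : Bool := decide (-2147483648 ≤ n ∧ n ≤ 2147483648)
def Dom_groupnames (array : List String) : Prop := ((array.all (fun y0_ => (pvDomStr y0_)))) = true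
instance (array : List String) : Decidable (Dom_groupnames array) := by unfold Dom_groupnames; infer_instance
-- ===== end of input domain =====

-- B records all '=' positions in one pass and emits each segment directly, instead of
-- A's while-loop that rescans the remainder with find_2nd on every iteration.

-- ===== PORT A =====
-- inner helper find_2nd: x += (c == "="); return i when x hits 2, else 0
def pvFind2ndAux : List String → Int → Int → Int
  | [], _, _ => 0
  | c :: rest, i, x =>
    let x' := x + (if c = "=" then 1 else 0)
    if x' = 2 then i else pvFind2ndAux rest (i + 1) x'

def pvFind2nd (array : List String) : Int := pvFind2ndAux array 0 0

-- the 'while x := find_2nd(array): out += [...]; array = array[x-1:]' loop; the fuel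
-- only bounds the iterations (A itself diverges on the inputs Pre_ excludes; inside
-- Pre_ the loop runs less than `fuel` times, so the fuel branch is never taken)
def pvGroupLoop : Nat → List String → List String → List String
  | 0, arr, out => out ++ [PySem.Str.join "" arr]
  | fuel + 1, arr, out =>
    if pvFind2nd arr = 0 then out ++ [PySem.Str.join "" arr]
    else
      pvGroupLoop fuel (PySem.List.slice arr (some (pvFind2nd arr - 1)) none)
        (out ++ [PySem.Str.join "" (PySem.List.slice arr none (some (pvFind2nd arr - 1)))])

def groupnames (array : List String) : List String :=
  match PySem.List.index? array "=" with
  | none => array          -- except ValueError: return array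
  | some i =>
    let ind : Int := (i : Int) - 1
    let out := PySem.List.slice array none (some ind)
    let arr := PySem.List.slice array (some ind) none
    pvGroupLoop (arr.length + 1) arr out

-- ===== PORT B =====
def groupnames_alt (array : List String) : List String :=
  let eqs : List Int := ((PySem.List.enumerate array).filter (fun p => p.2 == "=")).map (·.1)
  match eqs with
  | [] => array
  | e0 :: rest =>
    let s := rest.foldl
      (fun (s : List String × Int) e =>
        (s.1 ++ [PySem.Str.join "" (PySem.List.slice array (some s.2) (some (e - 1)))], e - 1))
      (PySem.List.slice array none (some (max (e0 - 1) 0)), max (e0 - 1) 0)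
    s.1 ++ [PySem.Str.join "" (PySem.List.slice array (some s.2) none)]

-- ===== PRECONDITION & SPEC =====
-- no two adjacent "=" tokens
def pvNoAdj : List String → Bool
  | a :: b :: t => (!(a == "=" && b == "=")) && pvNoAdj (b :: t)
  | _ => true

-- Pre_ excludes exactly the inputs on which A DIVERGES: two adjacent "=" tokens make
-- find_2nd eventually return 1 forever, so the while-loop stops making progress —
-- unless the list starts with "=", where the loop body never runs and A returns.
def Pre_groupnames (array : List String) : Prop :=
  array.head? = some "=" ∨ pvNoAdj array = true
instance (array : List String) : Decidable (Pre_groupnames array) := by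
  unfold Pre_groupnames; infer_instance

def pvWitness_groupnames : List String := ["x", "=", "1", "y", "=", "2"]

-- On lists whose first element is "=" (other than ["="]), A's ind = index("=")-1 = -1
-- wraps around so A returns the input unchanged; B starts the first name segment at
-- index 0 and groups the tokens as intended.
def D_groupnames (array : List String) : Prop :=
  array.head? = some "=" ∧ array ≠ ["="]
instance (array : List String) : Decidable (D_groupnames array) := by
  unfold D_groupnames; infer_instance

def Spec_groupnames (array : List String) (out : List String) : Prop :=
  ¬ D_groupnames array → out = groupnames_alt array
instance (array : List String) (out : List String) : Decidable (Spec_groupnames array out) := by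
  unfold Spec_groupnames; infer_instance

def pvDiffWitness_groupnames : List String := ["=", "a"]
def pvDiffWitnessOut_groupnames : (List String) × (List String) := (["=", "a"], ["=a"])

-- ===== CLAIM (what is proved, stated in full; the proofs are below) =====
def Claim_unchanged_groupnames : Prop :=
  ∀ (array : List String), Dom_groupnames array → Pre_groupnames array →
    Spec_groupnames array (groupnames array)
def Claim_changed_groupnames : Prop :=
  Dom_groupnames (pvDiffWitness_groupnames) ∧ Pre_groupnames (pvDiffWitness_groupnames) ∧
  D_groupnames (pvDiffWitness_groupnames) ∧
  groupnames (pvDiffWitness_groupnames) = pvDiffWitnessOut_groupnames.1 ∧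
  groupnames_alt (pvDiffWitness_groupnames) = pvDiffWitnessOut_groupnames.2 ∧
  pvDiffWitnessOut_groupnames.1 ≠ pvDiffWitnessOut_groupnames.2

-- ===== LEMMAS AND PROOFS =====

-- positions of the "=" tokens, as Nats
def eqIdxN : List String → List Nat
  | [] => []
  | c :: t => if c = "=" then 0 :: (eqIdxN t).map (· + 1) else (eqIdxN t).map (· + 1)

-- the common shape of both results: for each "=" at position e after the first one,
-- a segment is cut at e - 1
def specSegs (array : List String) : Nat → List Nat → List String
  | b, [] => [PySem.Str.join "" (array.drop b)]
  | b, e :: es => PySem.Str.join "" ((array.drop b).take (e - 1 - b)) :: specSegs array (e - 1) es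

lemma find2ndAux_one (r : List String) : ∀ i : Int,
    pvFind2ndAux r i 1 = match eqIdxN r with
      | j :: _ => i + (j : Int)
      | [] => 0 := by
  induction r with
  | nil => intro i; simp [pvFind2ndAux, eqIdxN]
  | cons c t ih =>
    intro i
    by_cases hc : c = "="
    · simp [pvFind2ndAux, eqIdxN, hc]
    · simp only [pvFind2ndAux, eqIdxN, hc, if_false]
      rw [show (1 : Int) + 0 = 1 by ring]
      rw [if_neg (by norm_num), ih (i + 1)]
      cases h : eqIdxN t with
      | nil => simp
      | cons j js => simp; ring

lemma find2ndAux_zero (r : List String) : ∀ i : Int,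
    pvFind2ndAux r i 0 = match eqIdxN r with
      | _ :: j :: _ => i + (j : Int)
      | _ => 0 := by
  induction r with
  | nil => intro i; simp [pvFind2ndAux, eqIdxN]
  | cons c t ih =>
    intro i
    by_cases hc : c = "="
    · simp only [pvFind2ndAux, eqIdxN, hc, if_true]
      rw [show (0 : Int) + 1 = 1 by ring]
      rw [if_neg (by norm_num), find2ndAux_one t (i + 1)]
      cases h : eqIdxN t with
      | nil => simp
      | cons j js => simp; ring
    · simp only [pvFind2ndAux, eqIdxN, hc, if_false]
      rw [show (0 : Int) + 0 = 0 by ring, ih (i + 1)]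
      cases h : eqIdxN t with
      | nil => simp
      | cons j js =>
        cases js with
        | nil => simp
        | cons j2 js2 => simp; ring

lemma find2nd_eq (r : List String) :
    pvFind2nd r = match eqIdxN r with
      | _ :: j :: _ => (j : Int)
      | _ => 0 := by
  have h := find2ndAux_zero r 0
  unfold pvFind2nd
  rw [h]
  cases eqIdxN r with
  | nil => rfl
  | cons j js => cases js with
    | nil => rfl
    | cons j2 js2 => simp

lemma eqIdxN_drop (r : List String) : ∀ k : Nat,
    eqIdxN (r.drop k) = ((eqIdxN r).filter (fun e => decide (k ≤ e))).map (· - k) := by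
  induction r with
  | nil => intro k; simp [eqIdxN]
  | cons c t ih =>
    intro k
    cases k with
    | zero =>
      simp only [List.drop_zero]
      rw [List.filter_eq_self.mpr (by intro a _; simp)]
      simp
    | succ k' =>
      have hf : ((fun e => decide (k' + 1 ≤ e)) ∘ (fun x => x + 1)) = (fun e => decide (k' ≤ e)) := by
        funext x; simp [Function.comp]
      have hg : ((fun x => x - (k' + 1)) ∘ (fun x => x + 1)) = (fun x => x - k') := by
        funext x; simp [Function.comp]
      simp only [List.drop_succ_cons]
      rw [ih k']
      by_cases hc : c = "="
      · simp only [eqIdxN, hc, if_true]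
        rw [List.filter_cons_of_neg (by simp), List.filter_map, List.map_map, hf, hg]
      · simp only [eqIdxN, hc, if_false]
        rw [List.filter_map, List.map_map, hf, hg]

lemma eqIdxN_length_le (r : List String) : (eqIdxN r).length ≤ r.length := by
  induction r with
  | nil => simp [eqIdxN]
  | cons c t ih =>
    by_cases hc : c = "="
    · simp [eqIdxN, hc]; omega
    · simp [eqIdxN, hc]; omega

lemma eqIdxN_head_zero (r : List String) (l : List Nat) (h : eqIdxN r = 0 :: l) :
    r.head? = some "=" := by
  cases r with
  | nil => simp [eqIdxN] at h
  | cons c t =>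
    by_cases hc : c = "="
    · simp [hc]
    · exfalso
      simp only [eqIdxN, hc, if_false] at h
      cases he : eqIdxN t with
      | nil => rw [he] at h; simp at h
      | cons j js => rw [he] at h; simp at h

lemma index?_eq_head_eqIdxN (r : List String) :
    PySem.List.index? r "=" = (eqIdxN r).head? := by
  induction r with
  | nil => simp [eqIdxN, PySem.List.index?]
  | cons c t ih =>
    by_cases hc : c = "="
    · subst hc; rw [PySem.List.index?_cons_self]; simp [eqIdxN]
    · rw [PySem.List.index?_cons_of_ne t hc, ih]
      simp [eqIdxN, hc, List.head?_map]

lemma isChain_ge_of_mem : ∀ (es : List Nat) (e : Nat),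
    List.IsChain (fun a b => a + 2 ≤ b) (e :: es) → ∀ x ∈ es, e + 2 ≤ x := by
  intro es
  induction es with
  | nil => intro e _ x hx; simp at hx
  | cons y t ih =>
    intro e h x hx
    have h1 : e + 2 ≤ y := (List.isChain_cons.mp h).1 y (by simp)
    have h2 := (List.isChain_cons.mp h).2
    rcases List.mem_cons.mp hx with rfl | hxt
    · exact h1
    · have := ih y h2 x hxt; omega

lemma chain2_of_noAdj : ∀ r, pvNoAdj r = true →
    List.IsChain (fun a b => a + 2 ≤ b) (eqIdxN r) := by
  intro r
  induction r with
  | nil => intro _; simp [eqIdxN]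
  | cons c t ih =>
    intro h
    have ht : pvNoAdj t = true := by
      cases t with
      | nil => rfl
      | cons d t' => simp only [pvNoAdj, Bool.and_eq_true] at h; exact h.2
    have iht := ih ht
    by_cases hc : c = "="
    · rw [eqIdxN, if_pos hc, List.isChain_cons]
      constructor
      · intro y hy
        cases he : eqIdxN t with
        | nil => rw [he] at hy; simp at hy
        | cons j js =>
          rw [he] at hy; simp at hy
          have hj : j ≠ 0 := by
            intro h0; subst h0
            have hhd := eqIdxN_head_zero t js he
            cases t with
            | nil => simp at hhd
            | cons d t' =>
              simp at hhd
              rw [pvNoAdj, hc, hhd] at h; simp at h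
          omega
      · rw [List.isChain_map]
        exact iht.imp (fun a b hab => by omega)
    · rw [eqIdxN, if_neg hc, List.isChain_map]
      exact iht.imp (fun a b hab => by omega)

lemma enum_filter_eq (r : List String) : ∀ s : Int,
    ((PySem.List.enumerate r s).filter (fun p => p.2 == "=")).map (·.1)
      = (eqIdxN r).map (fun n : Nat => s + (n : Int)) := by
  induction r with
  | nil => intro s; simp [eqIdxN]
  | cons c t ih =>
    intro s
    rw [PySem.List.enumerate_cons]
    by_cases hc : c = "="
    · subst hc
      rw [List.filter_cons_of_pos (by simp), List.map_cons, ih (s + 1)]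
      rw [show eqIdxN ("=" :: t) = 0 :: (eqIdxN t).map (· + 1) from by simp [eqIdxN]]
      simp only [List.map_cons, List.map_map, Nat.cast_zero, add_zero]
      congr 1
      apply List.map_congr_left
      intro n _; simp [Function.comp]; ring
    · rw [List.filter_cons_of_neg (by simp [hc]), ih (s + 1)]
      simp only [eqIdxN, hc, if_false, List.map_map]
      apply List.map_congr_left
      intro n _; simp [Function.comp]; ring

-- A's while-loop computes the segment list
lemma lemA (array : List String) : ∀ (es : List Nat) (b : Nat) (out : List String) (fuel : Nat),
    eqIdxN (array.drop b) = (((b + 1) :: es).map (· - b)) →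
    List.IsChain (fun a b' => a + 2 ≤ b') ((b + 1) :: es) →
    es.length < fuel →
    pvGroupLoop fuel (array.drop b) out = out ++ specSegs array b es := by
  intro es
  induction es with
  | nil =>
    intro b out fuel h _ hfuel
    cases fuel with
    | zero => omega
    | succ f =>
      have h1 : eqIdxN (array.drop b) = [1] := by rw [h]; simp
      have hx : pvFind2nd (array.drop b) = 0 := by rw [find2nd_eq, h1]
      rw [pvGroupLoop, if_pos hx]
      simp [specSegs]
  | cons e es' ih =>
    intro b out fuel h hch hfuel
    cases fuel with
    | zero => omega
    | succ f =>
      have hbe : b + 3 ≤ e := by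
        have := (List.isChain_cons.mp hch).1 e (by simp); omega
      have hch2 : List.IsChain (fun a b' => a + 2 ≤ b') (e :: es') :=
        (List.isChain_cons.mp hch).2
      have hmem : ∀ x ∈ es', e + 2 ≤ x := isChain_ge_of_mem es' e hch2
      have h1 : eqIdxN (array.drop b) = 1 :: (e - b) :: es'.map (· - b) := by
        rw [h]; simp
      have hx : pvFind2nd (array.drop b) = ((e - b : Nat) : Int) := by
        rw [find2nd_eq, h1]
      have hxne : ¬(pvFind2nd (array.drop b) = 0) := by
        rw [hx]; simp; omega
      have hx1 : pvFind2nd (array.drop b) - 1 = ((e - b - 1 : Nat) : Int) := by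
        rw [hx]; omega
      rw [pvGroupLoop, if_neg hxne, hx1, PySem.List.slice_from_natCast,
          PySem.List.slice_to_natCast, List.drop_drop]
      have hd : b + (e - b - 1) = e - 1 := by omega
      rw [hd]
      -- IH hypotheses at b := e - 1
      have harg1 : eqIdxN (array.drop (e - 1)) = (((e - 1 + 1) :: es').map (· - (e - 1))) := by
        have hdd : array.drop (e - 1) = (array.drop b).drop (e - 1 - b) := by
          rw [List.drop_drop]; congr 1; omega
        rw [hdd, eqIdxN_drop, h1]
        rw [List.filter_cons_of_neg (by simp; omega),
            List.filter_cons_of_pos (by simp; omega),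
            List.filter_eq_self.mpr (by
              intro a ha
              rcases List.mem_map.mp ha with ⟨y, hy, rfl⟩
              have := hmem y hy
              simp; omega)]
        simp only [List.map_cons, List.map_map]
        have he1 : e - b - (e - 1 - b) = 1 := by omega
        have he2 : e - 1 + 1 - (e - 1) = 1 := by omega
        rw [he1, he2]
        congr 1
        apply List.map_congr_left
        intro y hy
        have := hmem y hy
        simp [Function.comp]; omega
      have harg2 : List.IsChain (fun a b' => a + 2 ≤ b') ((e - 1 + 1) :: es') := by
        have : e - 1 + 1 = e := by omega
        rw [this]; exact hch2
      have harg3 : es'.length < f := by simp at hfuel; omega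
      rw [ih (e - 1) (out ++ [PySem.Str.join "" ((array.drop b).take (e - b - 1))]) f harg1 harg2 harg3]
      rw [specSegs]
      have ht : e - b - 1 = e - 1 - b := by omega
      rw [ht]
      simp

-- B's fold computes the same segment list
lemma lemB (array : List String) : ∀ (es : List Nat) (b : Nat) (out : List String),
    List.IsChain (fun a b' => a + 2 ≤ b') ((b + 1) :: es) →
    ((es.map (fun n : Nat => (n : Int))).foldl
        (fun (s : List String × Int) e =>
          (s.1 ++ [PySem.Str.join "" (PySem.List.slice array (some s.2) (some (e - 1)))], e - 1))
        (out, (b : Int))).1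
      ++ [PySem.Str.join "" (PySem.List.slice array
            (some ((es.map (fun n : Nat => (n : Int))).foldl
              (fun (s : List String × Int) e =>
                (s.1 ++ [PySem.Str.join "" (PySem.List.slice array (some s.2) (some (e - 1)))], e - 1))
              (out, (b : Int))).2) none)]
      = out ++ specSegs array b es := by
  intro es
  induction es with
  | nil =>
    intro b out _
    simp only [List.map_nil, List.foldl_nil]
    rw [PySem.List.slice_from_natCast]
    simp [specSegs]
  | cons e es' ih =>
    intro b out hch
    have hbe : b + 3 ≤ e := by
      have := (List.isChain_cons.mp hch).1 e (by simp); omega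
    have hch2 : List.IsChain (fun a b' => a + 2 ≤ b') (e :: es') :=
      (List.isChain_cons.mp hch).2
    have he1 : ((e : Nat) : Int) - 1 = ((e - 1 : Nat) : Int) := by omega
    simp only [List.map_cons, List.foldl_cons]
    rw [he1, PySem.List.slice_natCast]
    have harg2 : List.IsChain (fun a b' => a + 2 ≤ b') ((e - 1 + 1) :: es') := by
      have : e - 1 + 1 = e := by omega
      rw [this]; exact hch2
    rw [ih (e - 1) (out ++ [PySem.Str.join "" ((array.drop b).take (e - 1 - b))]) harg2]
    rw [specSegs]
    simp

-- endpoints: the first "=" is not at position 0 when the head is not "="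
lemma eqIdxN_first_pos (r : List String) (i0 : Nat) (es : List Nat)
    (h : eqIdxN r = i0 :: es) (hhd : ¬ r.head? = some "=") : 1 ≤ i0 := by
  rcases Nat.eq_zero_or_pos i0 with h0 | h1
  · subst h0; exact absurd (eqIdxN_head_zero r es h) hhd
  · omega

-- main equivalence outside D_
lemma main_eq (array : List String) (hpre : Pre_groupnames array)
    (hnd : ¬ D_groupnames array) : groupnames array = groupnames_alt array := by
  by_cases hhd : array.head? = some "="
  · have harr : array = ["="] := by
      unfold D_groupnames at hnd
      by_contra hne
      exact hnd ⟨hhd, hne⟩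
    subst harr; decide
  · have hna : pvNoAdj array = true := by
      rcases hpre with h | h
      · exact absurd h hhd
      · exact h
    have hch0 := chain2_of_noAdj array hna
    have heqs : ((PySem.List.enumerate array).filter (fun p => p.2 == "=")).map (·.1)
        = (eqIdxN array).map (fun n : Nat => (n : Int)) := by
      rw [enum_filter_eq array 0]
      apply List.map_congr_left
      intro y _; simp
    cases h : eqIdxN array with
    | nil =>
      have hA : PySem.List.index? array "=" = none := by
        rw [index?_eq_head_eqIdxN, h]; rfl
      unfold groupnames groupnames_alt
      rw [hA, heqs, h]
      simp
    | cons i0 es =>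
      have hi0 : 1 ≤ i0 := eqIdxN_first_pos array i0 es h hhd
      have hch : List.IsChain (fun a b' => a + 2 ≤ b') (i0 :: es) := by rw [h] at hch0; exact hch0
      have hmem : ∀ x ∈ es, i0 + 2 ≤ x := isChain_ge_of_mem es i0 hch
      have hA : PySem.List.index? array "=" = some i0 := by
        rw [index?_eq_head_eqIdxN, h]; rfl
      have hcast : (i0 : Int) - 1 = ((i0 - 1 : Nat) : Int) := by omega
      have hmax : max (((i0 - 1 : Nat) : Int)) 0 = ((i0 - 1 : Nat) : Int) := by omega
      -- hypotheses for lemA / lemB at b := i0 - 1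
      have hb1 : i0 - 1 + 1 = i0 := by omega
      have harg1 : eqIdxN (array.drop (i0 - 1)) = (((i0 - 1 + 1) :: es).map (· - (i0 - 1))) := by
        rw [eqIdxN_drop, h, hb1]
        rw [List.filter_eq_self.mpr (by
          intro a ha
          rcases List.mem_cons.mp ha with rfl | hat
          · simp
          · have := hmem a hat; simp; omega)]
      have harg2 : List.IsChain (fun a b' => a + 2 ≤ b') ((i0 - 1 + 1) :: es) := by
        rw [hb1]; exact hch
      have hfuel : es.length < (array.drop (i0 - 1)).length + 1 := by
        have hl := eqIdxN_length_le (array.drop (i0 - 1))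
        rw [harg1] at hl
        simp at hl ⊢
        omega
      unfold groupnames groupnames_alt
      rw [hA, heqs, h]
      simp only [List.map_cons]
      rw [hcast, hmax, PySem.List.slice_from_natCast, PySem.List.slice_to_natCast]
      rw [lemA array es (i0 - 1) (array.take (i0 - 1)) ((array.drop (i0 - 1)).length + 1)
            harg1 harg2 hfuel]
      rw [lemB array es (i0 - 1) (array.take (i0 - 1)) harg2]

-- ===== VERDICT (by name: the statement is the Claim_ definition above) =====
theorem groupnames_spec : Claim_unchanged_groupnames := by
  intro array _ hpre hnd
  exact main_eq array hpre hnd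

theorem groupnames_changed : Claim_changed_groupnames := by
  unfold Claim_changed_groupnames; decide
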